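-- pv_equiv track=rewrite | github.com/Githubowy-Juliusz/PSW-Lab1 | Zadanie2.py | count_binary_holes
-- ===== SOURCE A (Python) =====
-- def count_binary_holes(binary_string):
-- 	number_of_holes = 0
-- 	state = 0
-- 	for bit in binary_string:
-- 		if state == 0 and bit == "1":
-- 			state = 1
-- 		elif state == 1 and bit == "0":
-- 			state = 2
-- 		elif state == 2 and bit == "1":
-- 			state = 1
-- 			number_of_holes += 1
-- 	return number_of_holes
-- ===== SOURCE B (Python) =====
-- def count_binary_holes(binary_string):
--     groups = binary_string.split("1")
--     return sum(1 for g in groups[1:-1] if "0" in g)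
-- ===== Notes on version B (the rewrite author's own statement) =====
-- stated objective: simpler
-- what changed: Replaces the per-character three-state FSM with a split-then-count pass: split the string at every 1-bit and count the interior groups that contain a zero bit.
import Mathlib
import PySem

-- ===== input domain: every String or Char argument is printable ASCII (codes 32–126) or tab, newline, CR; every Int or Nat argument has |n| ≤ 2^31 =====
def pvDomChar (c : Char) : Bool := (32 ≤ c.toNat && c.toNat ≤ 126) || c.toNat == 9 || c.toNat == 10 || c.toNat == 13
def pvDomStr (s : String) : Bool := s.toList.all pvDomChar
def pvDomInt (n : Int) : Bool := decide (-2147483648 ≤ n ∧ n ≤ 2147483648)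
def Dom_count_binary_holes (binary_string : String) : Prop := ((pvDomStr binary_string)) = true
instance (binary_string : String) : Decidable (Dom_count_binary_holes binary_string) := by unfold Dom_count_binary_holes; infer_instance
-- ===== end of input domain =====

-- B replaces A's three-state per-character FSM with split-at-'1' then counting interior groups that contain a '0' (same cost, simpler).

-- ===== PORT A =====
-- literal port of A's FSM loop: accumulator (number_of_holes, state), branches in source order
def count_binary_holes (binary_string : String) : Int :=
  (binary_string.toList.foldl
    (fun (acc : Int × Int) bit =>
      if acc.2 = 0 ∧ bit = '1' then (acc.1, 1)
      else if acc.2 = 1 ∧ bit = '0' then (acc.1, 2)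
      else if acc.2 = 2 ∧ bit = '1' then (acc.1 + 1, 1)
      else acc)
    (0, 0)).1

-- ===== PORT B =====
-- port of Source B: groups = binary_string.split("1"); sum(1 for g in groups[1:-1] if "0" in g)
def count_binary_holes_alt (binary_string : String) : Int :=
  let groups := PySem.Chars.splitOn binary_string.toList ['1']
  ((PySem.List.slice groups (some 1) (some (-1))).countP
    (fun g => PySem.Chars.isIn ['0'] g) : Int)

-- ===== PRECONDITION & SPEC =====
def Spec_count_binary_holes (binary_string : String) (out : Int) : Prop := out = count_binary_holes_alt binary_string
instance (binary_string : String) (out : Int) : Decidable (Spec_count_binary_holes binary_string out) := by unfold Spec_count_binary_holes; infer_instance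

-- ===== CLAIM (what is proved, stated in full; the proofs are below) =====
def Claim_equal_count_binary_holes : Prop := ∀ (binary_string : String), Dom_count_binary_holes binary_string → Spec_count_binary_holes binary_string (count_binary_holes binary_string)

-- ===== LEMMAS AND PROOFS =====

-- reference split-at-'1' on List Char
def mySplit : List Char → List (List Char)
  | [] => [[]]
  | c :: t =>
    if c = '1' then [] :: mySplit t
    else
      match mySplit t with
      | [] => [[c]]
      | g :: gs => (c :: g) :: gs

theorem mySplit_ne_nil (l : List Char) : mySplit l ≠ [] := by
  cases l with
  | nil => simp [mySplit]
  | cons c t =>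
    simp only [mySplit]
    split
    · simp
    · cases h : mySplit t <;> simp

-- hole counts of the FSM started in state 1 / state 2 / state 0
mutual
def holes1 : List Char → Int
  | [] => 0
  | c :: t => if c = '1' then holes1 t else if c = '0' then holes2 t else holes1 t
def holes2 : List Char → Int
  | [] => 0
  | c :: t => if c = '1' then 1 + holes1 t else holes2 t
end

def holes0 : List Char → Int
  | [] => 0
  | c :: t => if c = '1' then holes1 t else holes0 t

-- A's foldl from each state equals h + the corresponding hole count
theorem fsm_run (l : List Char) : ∀ h : Int,
    (l.foldl (fun (acc : Int × Int) bit =>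
      if acc.2 = 0 ∧ bit = '1' then (acc.1, 1)
      else if acc.2 = 1 ∧ bit = '0' then (acc.1, 2)
      else if acc.2 = 2 ∧ bit = '1' then (acc.1 + 1, 1)
      else acc) (h, 0)).1 = h + holes0 l
    ∧ (l.foldl (fun (acc : Int × Int) bit =>
      if acc.2 = 0 ∧ bit = '1' then (acc.1, 1)
      else if acc.2 = 1 ∧ bit = '0' then (acc.1, 2)
      else if acc.2 = 2 ∧ bit = '1' then (acc.1 + 1, 1)
      else acc) (h, 1)).1 = h + holes1 l
    ∧ (l.foldl (fun (acc : Int × Int) bit =>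
      if acc.2 = 0 ∧ bit = '1' then (acc.1, 1)
      else if acc.2 = 1 ∧ bit = '0' then (acc.1, 2)
      else if acc.2 = 2 ∧ bit = '1' then (acc.1 + 1, 1)
      else acc) (h, 2)).1 = h + holes2 l := by
  induction l with
  | nil => intro h; simp [holes0, holes1, holes2]
  | cons c t ih =>
    intro h
    by_cases h1 : c = '1'
    · subst h1
      refine ⟨?_, ?_, ?_⟩
      · simpa [List.foldl_cons, holes0] using (ih h).2.1
      · simpa [List.foldl_cons, holes1] using (ih h).2.1
      · have := (ih (h + 1)).2.1
        simp only [List.foldl_cons, holes2]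
        simp only [show ((2:Int) = 0 ∧ ('1':Char) = '1') = False by simp,
          show ((2:Int) = 1 ∧ ('1':Char) = '0') = False by simp] at *
        simp at this ⊢
        omega
    · by_cases h0 : c = '0'
      · subst h0
        simp [List.foldl_cons, holes0, holes1, holes2, h1, ih]
      · simp [List.foldl_cons, holes0, holes1, holes2, h1, h0, ih]

-- '0' ∈ g iff ['0'] occurs in g as a substring
theorem isIn_singleton (g : List Char) : PySem.Chars.isIn ['0'] g = g.contains '0' := by
  by_cases h : '0' ∈ g
  · have : ['0'] <:+: g := by
      obtain ⟨s, t, rfl⟩ := List.append_of_mem h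
      exact ⟨s, t, by simp⟩
    simp [(PySem.Chars.isIn_iff_infix _ _).mpr this, h]
  · have : ¬ ['0'] <:+: g := by
      intro ⟨s, t, e⟩
      exact h (by rw [← e]; simp)
    simp [(PySem.Chars.isIn_eq_false_iff _ _).mpr this, h]

-- closed forms of holes1/holes2 in terms of mySplit
theorem holes12_closed (l : List Char) :
    holes1 l = ((mySplit l).dropLast.countP (fun g => g.contains '0') : Int)
    ∧ holes2 l = (match mySplit l with
        | [] => 0
        | [_] => (0 : Int)
        | _ :: gs => 1 + (gs.dropLast.countP (fun g => g.contains '0') : Int)) := by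
  induction l with
  | nil => simp [holes1, holes2, mySplit]
  | cons c t ih =>
    obtain ⟨ih1, ih2⟩ := ih
    by_cases h1 : c = '1'
    · subst h1
      have hne := mySplit_ne_nil t
      constructor
      · simp only [holes1, if_pos rfl, mySplit, ih1]
        cases h : mySplit t with
        | nil => exact absurd h hne
        | cons g gs => simp [h, List.dropLast_cons_of_ne_nil, List.countP_cons]
      · simp only [holes2, if_pos rfl, mySplit, ih1]
        cases h : mySplit t with
        | nil => exact absurd h hne
        | cons g gs => simp [h]
    · have hsplit : ∃ g gs, mySplit t = g :: gs := by
        cases h : mySplit t with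
        | nil => exact absurd h (mySplit_ne_nil t)
        | cons g gs => exact ⟨g, gs, rfl⟩
      obtain ⟨g, gs, hgs⟩ := hsplit
      have hms : mySplit (c :: t) = (c :: g) :: gs := by
        simp [mySplit, h1, hgs]
      by_cases h0 : c = '0'
      · subst h0
        constructor
        · simp only [holes1, if_neg h1, if_pos rfl, ih2, hgs, hms]
          cases gs with
          | nil => simp
          | cons g' gs' =>
            simp only [List.dropLast_cons_of_ne_nil (List.cons_ne_nil g' gs'),
              List.countP_cons]
            simp
            push_cast
            ring
        · simp only [holes2, if_neg h1, ih2, hgs, hms]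
          cases gs with
          | nil => simp
          | cons g' gs' => simp
      · constructor
        · simp only [holes1, if_neg h1, if_neg h0, ih1, hgs, hms]
          cases gs with
          | nil => simp
          | cons g' gs' =>
            have hc0 : ¬ ('0' = c) := fun e => h0 e.symm
            simp [List.dropLast_cons_of_ne_nil, List.countP_cons, hc0]
        · simp only [holes2, if_neg h1, ih2, hgs, hms]
          cases gs with
          | nil => simp
          | cons g' gs' => simp

-- holes0 counts the interior groups of mySplit that contain a '0'
theorem holes0_closed (l : List Char) :
    holes0 l = ((((mySplit l).drop 1).dropLast).countP (fun g => g.contains '0') : Int) := by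
  induction l with
  | nil => simp [holes0, mySplit]
  | cons c t ih =>
    by_cases h1 : c = '1'
    · subst h1
      simp only [holes0, if_pos rfl, mySplit]
      have hne := mySplit_ne_nil t
      rw [(holes12_closed t).1]
      cases h : mySplit t with
      | nil => exact absurd h hne
      | cons g gs => simp [h]
    · obtain ⟨g, gs, hgs⟩ : ∃ g gs, mySplit t = g :: gs := by
        cases h : mySplit t with
        | nil => exact absurd h (mySplit_ne_nil t)
        | cons g gs => exact ⟨g, gs, rfl⟩
      have hms : mySplit (c :: t) = (c :: g) :: gs := by
        simp [mySplit, h1, hgs]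
      simp only [holes0, if_neg h1, ih, hgs, hms, List.drop_one, List.tail_cons]

-- consHead pre gs prepends pre to the first group
def consHead (pre : List Char) : List (List Char) → List (List Char)
  | [] => [pre]
  | g :: gs => (pre ++ g) :: gs

-- PySem's fueled split kernel computes mySplit
theorem go_eq_mySplit (l : List Char) : ∀ fuel cur acc, l.length < fuel →
    PySem.Chars.splitOn.go ['1'] fuel l cur acc
      = acc.reverse ++ consHead cur.reverse (mySplit l) := by
  induction l with
  | nil =>
    intro fuel cur acc _
    cases fuel <;> simp [PySem.Chars.splitOn.go, mySplit, consHead]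
  | cons c t ih =>
    intro fuel cur acc hf
    cases fuel with
    | zero => omega
    | succ f =>
      by_cases h1 : c = '1'
      · subst h1
        have hpre : List.isPrefixOf ['1'] ('1' :: t) = true := by
          simp [List.isPrefixOf]
        rw [PySem.Chars.splitOn.go]
        simp only [hpre, if_true, List.length_cons, List.length_nil, List.drop_succ_cons, List.drop_zero]
        rw [ih f [] (cur.reverse :: acc) (by simpa using hf)]
        obtain ⟨g, gs, hgs⟩ : ∃ g gs, mySplit t = g :: gs := by
          cases h : mySplit t with
          | nil => exact absurd h (mySplit_ne_nil t)
          | cons g gs => exact ⟨g, gs, rfl⟩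
        simp [mySplit, hgs, consHead]
      · have hpre : List.isPrefixOf ['1'] (c :: t) = false := by
          simp [List.isPrefixOf]
          intro hc; exact absurd hc.symm h1
        rw [PySem.Chars.splitOn.go]
        simp only [hpre, Bool.false_eq_true, if_false]
        rw [ih f (c :: cur) acc (by simpa using Nat.lt_of_succ_lt_succ hf)]
        obtain ⟨g, gs, hgs⟩ : ∃ g gs, mySplit t = g :: gs := by
          cases h : mySplit t with
          | nil => exact absurd h (mySplit_ne_nil t)
          | cons g gs => exact ⟨g, gs, rfl⟩
        have hms : mySplit (c :: t) = (c :: g) :: gs := by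
          simp [mySplit, h1, hgs]
        simp [hms, hgs, consHead]

theorem splitOn_eq_mySplit (l : List Char) :
    PySem.Chars.splitOn l ['1'] = mySplit l := by
  obtain ⟨g, gs, hgs⟩ : ∃ g gs, mySplit l = g :: gs := by
    cases h : mySplit l with
    | nil => exact absurd h (mySplit_ne_nil l)
    | cons g gs => exact ⟨g, gs, rfl⟩
  have hgo := go_eq_mySplit l (l.length + 1) [] [] (by omega)
  unfold PySem.Chars.splitOn
  rw [hgo, hgs]
  simp [consHead]

-- groups[1:-1] is drop-first-and-last
theorem slice_interior {α : Type} (xs : List α) :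
    PySem.List.slice xs (some 1) (some (-1)) = (xs.drop 1).dropLast := by
  cases xs with
  | nil => simp [PySem.List.slice, PySem.List.clampIdx]
  | cons x t =>
    simp [PySem.List.slice, PySem.List.clampIdx, List.dropLast_eq_take]
    split_ifs <;> simp_all <;> omega

-- ===== VERDICT (by name: the statement is the Claim_ definition above) =====
theorem count_binary_holes_spec : Claim_equal_count_binary_holes := by
  intro s _
  unfold Spec_count_binary_holes count_binary_holes count_binary_holes_alt
  rw [(fsm_run s.toList 0).1, holes0_closed, splitOn_eq_mySplit]
  simp only [slice_interior, isIn_singleton]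
  simp
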